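-- pv_equiv track=rewrite | github.com/rjbatista/AoC | aoc/event2019/day16/solve.py | repeat_fft_p2
-- ===== SOURCE A (Python) =====
-- def get_answer(inp):
--     return ''.join([str(x) for x in inp])[:8]
--
-- def repeat_fft_p2(inp, count):
--     offset = int(get_answer(inp)[:7])
--     inp = inp * 10000
--     inp_len = len(inp)
--
--     for _ in range(count):
--         acc = 0
--         for j in range(inp_len - 1, offset - 1, -1):
--             acc += inp[j]
--             inp[j] = acc % 10
--
--     return inp[offset : offset + 8]
-- ===== SOURCE B (Python) =====
-- # B: closed form — after c passes the tail transform is a binomial-weighted suffix sum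
-- # (weights C(c-1+k, k) mod 10 via Lucas mod 2 and mod 5 + CRT); computes only the 8 output digits.
-- def _comb_small(n, k):
--     # C(n, k) for small non-negative n, k
--     if k > n:
--         return 0
--     r = 1
--     for i in range(k):
--         r = r * (n - i) // (i + 1)
--     return r
--
-- def _binom_mod_p(n, k, p):
--     # Lucas' theorem: C(n, k) mod prime p
--     r = 1
--     while k > 0:
--         r = (r * _comb_small(n % p, k % p)) % p
--         n //= p
--         k //= p
--     return r % p
--
-- def _binom_mod10(n, k):
--     # CRT: 6 = (0 mod 2, 1 mod 5), 5 = (1 mod 2, 0 mod 5)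
--     return (_binom_mod_p(n, k, 5) * 6 + _binom_mod_p(n, k, 2) * 5) % 10
--
-- def repeat_fft_p2(inp, count):
--     offset = int(''.join(str(x) for x in inp)[:7])
--     big = inp * 10000
--     region = big[offset:]
--     if count <= 0:
--         return region[:8]
--     m = len(region)
--     w = [_binom_mod10(count - 1 + k, k) for k in range(m)]
--     out = []
--     for i in range(min(8, m)):
--         acc = 0
--         for k in range(m - i):
--             acc += w[k] * region[i + k]
--         out.append(acc % 10)
--     return out
-- ===== Notes on version B (the rewrite author's own statement) =====
-- stated objective: faster
-- what changed: Instead of running count full suffix-cumsum passes over the 10000x-repeated list, B uses the closed form of the iterated cumulative sum: output digit i equals sum_k C(count-1+k,k)*x[offset+i+k] mod 10, with the binomial coefficients mod 10 computed by Lucas' theorem mod 2 and mod 5 plus CRT, and only the <=8 returned digits are computed.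
-- outside the precondition, e.g. on repeat_fft_p2([-5], 1): A returns [], B returns [5, 0, 5, 0, 5]
import Mathlib
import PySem

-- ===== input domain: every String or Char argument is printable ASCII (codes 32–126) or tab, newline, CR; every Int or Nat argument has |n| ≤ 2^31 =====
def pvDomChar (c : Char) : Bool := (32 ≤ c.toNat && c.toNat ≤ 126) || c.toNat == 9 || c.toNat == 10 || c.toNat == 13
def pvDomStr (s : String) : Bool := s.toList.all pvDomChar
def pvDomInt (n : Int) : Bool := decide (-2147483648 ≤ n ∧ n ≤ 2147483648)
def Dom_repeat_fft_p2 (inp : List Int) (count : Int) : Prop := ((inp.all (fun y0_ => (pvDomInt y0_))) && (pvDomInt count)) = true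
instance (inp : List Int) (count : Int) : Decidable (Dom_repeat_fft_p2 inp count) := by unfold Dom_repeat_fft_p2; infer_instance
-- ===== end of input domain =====

-- B re-implements the iterated suffix-cumsum as a closed-form binomial-weighted sum
-- (Lucas mod 2 / mod 5 + CRT), computing only the ≤ 8 returned digits; equivalence is
-- proved on offsets that parse and are non-negative (Pre_ below).

-- ===== PORT A =====
def get_answer (inp : List Int) : String :=
  PySem.Str.slice (PySem.Str.join "" (inp.map (fun x => PySem.Int.toStr x))) none (some 8)

def repeat_fft_p2 (inp : List Int) (count : Int) : List Int :=
  match PySem.Int.ofStr? (PySem.Str.slice (get_answer inp) none (some 7)) with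
  | none => []   -- int() raises ValueError here; excluded by Pre_
  | some offset =>
    let inp2 : List Int := PySem.List.pyRepeat inp 10000
    let inp_len : Int := (inp2.length : Int)
    let final : Array Int :=
      (PySem.List.pyRange 0 count 1).foldl (fun arr _ =>
        ((PySem.List.pyRange (inp_len - 1) (offset - 1) (-1)).foldl
          (fun (st : Array Int × Int) j =>
            let acc := st.2 + st.1.getD j.toNat 0
            (st.1.setIfInBounds j.toNat (PySem.Int.mod acc 10), acc))
          (arr, (0 : Int))).1)
        inp2.toArray
    PySem.List.slice final.toList (some offset) (some (offset + 8))

-- ===== PORT B =====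
def comb_small (n k : Int) : Int :=
  if k > n then 0
  else (PySem.List.pyRange 0 k 1).foldl
    (fun r i => PySem.Int.floordiv (r * (n - i)) (i + 1)) 1

def binom_mod_p_go (n k p r : Int) : Int :=
  if h0 : 0 < k then
    if h1 : 1 < p then
      binom_mod_p_go (PySem.Int.floordiv n p) (PySem.Int.floordiv k p) p
        (PySem.Int.mod (r * comb_small (PySem.Int.mod n p) (PySem.Int.mod k p)) p)
    else 0  -- totality guard: the Python while-loop diverges for p ≤ 1; p is only ever 2 or 5
  else PySem.Int.mod r p
termination_by k.toNat
decreasing_by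
  rw [PySem.Int.floordiv_eq_ediv_of_pos (by omega)]
  have e1 : k = (k.toNat : Int) := (Int.toNat_of_nonneg (le_of_lt h0)).symm
  have e2 : p = (p.toNat : Int) := (Int.toNat_of_nonneg (by omega)).symm
  have e3 : k / p = ((k.toNat / p.toNat : Nat) : Int) := by rw [Int.natCast_div, ← e1, ← e2]
  have hlt : k.toNat / p.toNat < k.toNat := Nat.div_lt_self (by omega) (by omega)
  omega

def binom_mod_p (n k p : Int) : Int := binom_mod_p_go n k p 1

def binom_mod10 (n k : Int) : Int :=
  PySem.Int.mod (binom_mod_p n k 5 * 6 + binom_mod_p n k 2 * 5) 10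

def repeat_fft_p2_alt (inp : List Int) (count : Int) : List Int :=
  match PySem.Int.ofStr? (PySem.Str.slice (PySem.Str.join "" (inp.map (fun x => PySem.Int.toStr x))) none (some 7)) with
  | none => []   -- int() raises ValueError here; excluded by Pre_
  | some offset =>
    let big : List Int := PySem.List.pyRepeat inp 10000
    let region : List Int := PySem.List.slice big (some offset) none
    if count ≤ 0 then PySem.List.slice region none (some 8)
    else
      let m : Int := (region.length : Int)
      let w : List Int := (PySem.List.pyRange 0 m 1).map (fun k => binom_mod10 (count - 1 + k) k)
      (PySem.List.pyRange 0 (min 8 m) 1).foldl (fun out i =>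
        out ++ [PySem.Int.mod
          ((PySem.List.pyRange 0 (m - i) 1).foldl
            (fun acc k => acc + PySem.List.pyGetD w k 0 * PySem.List.pyGetD region (i + k) 0) 0)
          10]) []

-- ===== PRECONDITION & SPEC =====
-- Pre_ excludes inputs where int() of the 7-char prefix raises ValueError (A raises there),
-- and inputs whose prefix parses to a NEGATIVE offset: a negative message offset is meaningless
-- for this function, A's negative-index behaviour there is accidental, and either program's
-- value (or error) on it is as defensible as the other's.
def Pre_repeat_fft_p2 (inp : List Int) (count : Int) : Prop :=
  0 ≤ (PySem.Int.ofChars? (((inp.map (fun x => PySem.Int.toChars x)).flatten).take 7)).getD (-1)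
instance (inp : List Int) (count : Int) : Decidable (Pre_repeat_fft_p2 inp count) := by
  unfold Pre_repeat_fft_p2; infer_instance

def pvWitness_repeat_fft_p2 : List Int × Int := ([1, 2, 3], 1)

def Spec_repeat_fft_p2 (inp : List Int) (count : Int) (out : List Int) : Prop :=
  out = repeat_fft_p2_alt inp count
instance (inp : List Int) (count : Int) (out : List Int) : Decidable (Spec_repeat_fft_p2 inp count out) := by
  unfold Spec_repeat_fft_p2; infer_instance

-- ===== CLAIM (what is proved, stated in full; the proofs are below) =====
def Claim_equal_repeat_fft_p2 : Prop := ∀ (inp : List Int) (count : Int), Dom_repeat_fft_p2 inp count → Pre_repeat_fft_p2 inp count → Spec_repeat_fft_p2 inp count (repeat_fft_p2 inp count)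

-- ===== LEMMAS AND PROOFS =====

-- The one-pass transform of A's inner loop, as a list function: entry i becomes
-- (sum of the old suffix from i) mod 10.
def stepL : List Int → List Int
  | [] => []
  | x :: xs => (xs.sum + x) % 10 :: stepL xs

theorem length_stepL (t : List Int) : (stepL t).length = t.length := by
  induction t with
  | nil => rfl
  | cons x xs ih => simp [stepL, ih]



theorem arr_getD_toList (a : Array Int) (i : Nat) : a.getD i 0 = a.toList.getD i 0 := by
  rw [List.getD_eq_getElem?_getD, Array.getElem?_toList, Array.getD]
  split <;> simp_all

theorem foldl_const_iterate {α β : Type} (l : List β) (g : α → α) (init : α) :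
    l.foldl (fun a _ => g a) init = g^[l.length] init := by
  induction l generalizing init with
  | nil => rfl
  | cons x t ih => simp [List.foldl_cons, ih, Function.iterate_succ_apply]

theorem list_sum_getD (l : List Int) : l.sum = ∑ k ∈ Finset.range l.length, l.getD k 0 := by
  induction l with
  | nil => simp
  | cons x t ih =>
    rw [List.sum_cons, ih, List.length_cons, Finset.sum_range_succ']
    simp [add_comm]

theorem sum_drop (t : List Int) (i : Nat) :
    (t.drop i).sum = ∑ k ∈ Finset.range (t.length - i), t.getD (i + k) 0 := by
  rw [list_sum_getD, List.length_drop]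
  refine Finset.sum_congr rfl (fun k _ => ?_)
  rw [List.getD_eq_getElem?_getD, List.getD_eq_getElem?_getD, List.getElem?_drop]

theorem stepL_length_iter (c : Nat) (t : List Int) : (stepL^[c] t).length = t.length := by
  induction c generalizing t with
  | zero => rfl
  | succ c ih => rw [Function.iterate_succ_apply]; rw [ih, length_stepL]

theorem stepL_getD (t : List Int) (i : Nat) (hi : i < t.length) :
    (stepL t).getD i 0 = ((t.drop i).sum) % 10 := by
  induction t generalizing i with
  | nil => simp at hi
  | cons x xs ih =>
    cases i with
    | zero => simp [stepL, add_comm]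
    | succ j =>
      rw [List.drop_succ_cons]
      show (stepL xs).getD j 0 = _
      exact ih j (by simpa using hi)

-- triangle reindex: summing f over pairs (j,k) with j+k < M, by diagonals u = j+k
theorem triangle_swap (M : Nat) (f : Nat → Nat → Int) :
    ∑ j ∈ Finset.range M, ∑ k ∈ Finset.range (M - j), f j k
      = ∑ u ∈ Finset.range M, ∑ j ∈ Finset.range (u + 1), f j (u - j) := by
  induction M with
  | zero => simp
  | succ M ih =>
    rw [Finset.sum_range_succ, Finset.sum_range_succ (f := fun u => ∑ j ∈ Finset.range (u + 1), f j (u - j))]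
    have h1 : ∀ j ∈ Finset.range M, ∑ k ∈ Finset.range (M + 1 - j), f j k
        = (∑ k ∈ Finset.range (M - j), f j k) + f j (M - j) := by
      intro j hj
      have : M + 1 - j = (M - j) + 1 := by simp at hj; omega
      rw [this, Finset.sum_range_succ]
    rw [Finset.sum_congr rfl h1, Finset.sum_add_distrib, ih]
    have h2 : ∑ j ∈ Finset.range (M + 1), f j (M - j)
        = (∑ j ∈ Finset.range M, f j (M - j)) + f M 0 := by
      rw [Finset.sum_range_succ]; simp
    rw [h2]
    simp
    ring

theorem hockey (c u : Nat) :
    ∑ d ∈ Finset.range (u + 1), (c + d).choose d = (c + u + 1).choose u := by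
  induction u with
  | zero => simp
  | succ u ih =>
    rw [Finset.sum_range_succ, ih]
    have : c + (u + 1) = (c + u) + 1 := by omega
    rw [this]
    have h2 : c + u + 1 + 1 = (c + u + 1) + 1 := by omega
    rw [h2, Nat.choose_succ_succ (c + u + 1) u]

theorem stepL_iter_getD (c : Nat) (t : List Int) (i : Nat) (hi : i < t.length) :
    (stepL^[c + 1] t).getD i 0
      = (∑ k ∈ Finset.range (t.length - i), (((c + k).choose k : Nat) : Int) * t.getD (i + k) 0) % 10 := by
  induction c generalizing i with
  | zero =>
    rw [Function.iterate_one, stepL_getD t i hi, sum_drop]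
    congr 1
    refine Finset.sum_congr rfl (fun k _ => ?_)
    simp [Nat.choose_self]
  | succ c ih =>
    rw [Function.iterate_succ_apply']
    have hs : (stepL^[c + 1] t).length = t.length := stepL_length_iter _ t
    rw [stepL_getD _ i (by omega), sum_drop, hs]
    have h1 : ∀ j ∈ Finset.range (t.length - i), (stepL^[c + 1] t).getD (i + j) 0
        = (∑ k ∈ Finset.range (t.length - i - j), (((c + k).choose k : Nat) : Int) * t.getD (i + j + k) 0) % 10 := by
      intro j hj
      simp only [Finset.mem_range] at hj
      have hij : i + j < t.length := by omega
      have heq : t.length - (i + j) = t.length - i - j := by omega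
      rw [ih (i + j) hij, heq]
    rw [Finset.sum_congr rfl h1]
    rw [← Finset.sum_int_mod]
    rw [triangle_swap (t.length - i) (fun j k => (((c + k).choose k : Nat) : Int) * t.getD (i + j + k) 0)]
    congr 1
    refine Finset.sum_congr rfl (fun u hu => ?_)
    simp only [Finset.mem_range] at hu
    have h2 : ∀ j ∈ Finset.range (u + 1),
        (((c + (u - j)).choose (u - j) : Nat) : Int) * t.getD (i + j + (u - j)) 0
          = (((c + (u - j)).choose (u - j) : Nat) : Int) * t.getD (i + u) 0 := by
      intro j hj
      simp only [Finset.mem_range] at hj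
      congr 2
      omega
    rw [Finset.sum_congr rfl h2, ← Finset.sum_mul]
    congr 1
    rw [← Nat.cast_sum]
    norm_cast
    have h4 := Finset.sum_range_reflect (fun d => (c + d).choose d) (u + 1)
    simp only [Nat.add_sub_cancel] at h4
    rw [h4, hockey c u]
    congr 1
    omega

theorem innerA (n o : Nat) (ho : o ≤ n) (arr : Array Int) (ha : arr.toList.length = n) :
    (((PySem.List.pyRange (o : Int) (n : Int) 1).foldr
        (fun j st =>
          let acc := st.2 + st.1.getD j.toNat 0
          (st.1.setIfInBounds j.toNat (PySem.Int.mod acc 10), acc))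
        (arr, (0 : Int))).1.toList
      = arr.toList.take o ++ stepL (arr.toList.drop o))
    ∧ (((PySem.List.pyRange (o : Int) (n : Int) 1).foldr
        (fun j st =>
          let acc := st.2 + st.1.getD j.toNat 0
          (st.1.setIfInBounds j.toNat (PySem.Int.mod acc 10), acc))
        (arr, (0 : Int))).2
      = (arr.toList.drop o).sum) := by
  suffices H : ∀ d o, o ≤ n → n - o = d →
      (((PySem.List.pyRange (o : Int) (n : Int) 1).foldr
        (fun j st =>
          let acc := st.2 + st.1.getD j.toNat 0
          (st.1.setIfInBounds j.toNat (PySem.Int.mod acc 10), acc))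
        (arr, (0 : Int))).1.toList
      = arr.toList.take o ++ stepL (arr.toList.drop o))
    ∧ (((PySem.List.pyRange (o : Int) (n : Int) 1).foldr
        (fun j st =>
          let acc := st.2 + st.1.getD j.toNat 0
          (st.1.setIfInBounds j.toNat (PySem.Int.mod acc 10), acc))
        (arr, (0 : Int))).2
      = (arr.toList.drop o).sum) by
    exact H (n - o) o ho rfl
  intro d
  induction d with
  | zero =>
    intro o ho hd
    have hno : o = n := by omega
    subst hno
    rw [PySem.List.pyRange_one_eq_nil (by omega)]
    constructor
    · simp [List.take_of_length_le (le_of_eq ha), List.drop_of_length_le (le_of_eq ha), stepL]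
    · simp [List.drop_of_length_le (le_of_eq ha)]
  | succ d ihd =>
    intro o ho hd
    have ho' : o < n := by omega
    rw [PySem.List.pyRange_one_cons (by exact_mod_cast ho')]
    have hcast : ((o : Int) + 1) = ((o + 1 : Nat) : Int) := by push_cast; ring
    rw [List.foldr_cons, hcast]
    obtain ⟨ih1, ih2⟩ := ihd (o + 1) (by omega) (by omega)
    set l := arr.toList with hl
    have hol : o < l.length := by omega
    have htl : (l.take (o + 1)).length = o + 1 := by
      rw [List.length_take]; omega
    have hread : (((PySem.List.pyRange ((o + 1 : Nat) : Int) (n : Int) 1).foldr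
        (fun j st =>
          let acc := st.2 + st.1.getD j.toNat 0
          (st.1.setIfInBounds j.toNat (PySem.Int.mod acc 10), acc))
        (arr, (0 : Int))).1).getD o 0 = l.getD o 0 := by
      rw [arr_getD_toList, ih1, List.getD_append _ _ _ _ (by omega), List.getD_eq_getElem _ _ (by omega),
        List.getElem_take, ← List.getD_eq_getElem l 0 hol]
    simp only [List.foldr_cons] at *
    constructor
    · simp only [Int.toNat_natCast]
      rw [Array.toList_setIfInBounds, ih1, ih2, hread]
      rw [List.take_succ, List.getElem?_eq_getElem hol, Option.toList_some, List.append_assoc]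
      rw [List.set_append_right _ _ (by rw [List.length_take]; omega)]
      have : o - (l.take o).length = 0 := by rw [List.length_take]; omega
      rw [this, List.singleton_append, List.set_cons_zero]
      rw [List.drop_eq_getElem_cons hol]
      show _ = l.take o ++ ((l.drop (o+1)).sum + l[o]) % 10 :: stepL (l.drop (o+1))
      rw [PySem.Int.mod_eq_emod_of_pos (by norm_num), ← List.getD_eq_getElem l 0 hol]
    · simp only [Int.toNat_natCast]
      rw [ih2, hread, List.drop_eq_getElem_cons hol, List.sum_cons, ← List.getD_eq_getElem l 0 hol]
      ring

theorem passA (n o : Nat) (ho : o ≤ n) (arr : Array Int) (ha : arr.toList.length = n) :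
    (((PySem.List.pyRange ((n : Int) - 1) ((o : Int) - 1) (-1)).foldl
        (fun (st : Array Int × Int) j =>
          let acc := st.2 + st.1.getD j.toNat 0
          (st.1.setIfInBounds j.toNat (PySem.Int.mod acc 10), acc))
        (arr, (0 : Int))).1).toList
      = arr.toList.take o ++ stepL (arr.toList.drop o) := by
  have hrev : PySem.List.pyRange ((n : Int) - 1) ((o : Int) - 1) (-1)
      = (PySem.List.pyRange (o : Int) (n : Int) 1).reverse := by
    have e1 : ((o : Int) - 1) + 1 = (o : Int) := by ring
    have e2 : ((n : Int) - 1) + 1 = (n : Int) := by ring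
    rw [PySem.List.pyRange_neg_one_eq_reverse, e1, e2]
  rw [hrev, List.foldl_reverse]
  exact (innerA n o ho arr ha).1

theorem iterA (n o : Nat) (ho : o ≤ n) (c : Nat) (big : List Int) (hb : big.length = n) :
    ((fun arr =>
        ((PySem.List.pyRange ((n : Int) - 1) ((o : Int) - 1) (-1)).foldl
          (fun (st : Array Int × Int) j =>
            let acc := st.2 + st.1.getD j.toNat 0
            (st.1.setIfInBounds j.toNat (PySem.Int.mod acc 10), acc))
          (arr, (0 : Int))).1)^[c] big.toArray).toList
      = big.take o ++ stepL^[c] (big.drop o) := by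
  induction c with
  | zero => simp
  | succ c ih =>
    rw [Function.iterate_succ_apply']
    have hlen : (big.take o ++ stepL^[c] (big.drop o)).length = n := by
      rw [List.length_append, List.length_take, stepL_length_iter, List.length_drop]; omega
    have := passA n o ho _ (by rw [ih]; exact hlen)
    rw [this, ih]
    have hto : (big.take o).length = o := by rw [List.length_take]; omega
    rw [Function.iterate_succ_apply']
    congr 1
    · exact List.take_left' hto
    · congr 1
      exact List.drop_left' hto

theorem comb_aux (n : Nat) : ∀ j : Nat, j ≤ n →
    (PySem.List.pyRange 0 (j : Int) 1).foldl
      (fun r i => PySem.Int.floordiv (r * ((n : Int) - i)) (i + 1)) 1 = ((n.choose j : Nat) : Int) := by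
  intro j
  induction j with
  | zero => intro _; rw [PySem.List.pyRange_one_eq_nil (by omega)]; simp
  | succ j ih =>
    intro hj
    have hc : ((j + 1 : Nat) : Int) = (j : Int) + 1 := by push_cast; ring
    rw [hc, PySem.List.pyRange_one_succ_right (by omega), List.foldl_append, ih (by omega)]
    simp only [List.foldl_cons, List.foldl_nil]
    have h1 : (n : Int) - (j : Int) = ((n - j : Nat) : Int) := by omega
    have h2 : ((n.choose j : Nat) : Int) * ((n - j : Nat) : Int) = ((n.choose j * (n - j) : Nat) : Int) := by
      push_cast; ring
    have h3 : ((j : Int) + 1) = ((j + 1 : Nat) : Int) := by push_cast; ring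
    rw [h1, h2, h3, PySem.Int.floordiv_natCast]
    have h4 : n.choose j * (n - j) / (j + 1) = n.choose (j + 1) := by
      rw [← Nat.choose_succ_right_eq, Nat.mul_div_cancel _ (by omega)]
    rw [h4]

theorem comb_small_choose (n k : Nat) : comb_small (n : Int) (k : Int) = ((n.choose k : Nat) : Int) := by
  unfold comb_small
  by_cases hkn : k ≤ n
  · rw [if_neg (by exact_mod_cast not_lt.mpr (by exact_mod_cast hkn))]
    exact comb_aux n k hkn
  · rw [if_pos (by exact_mod_cast not_le.mp hkn), Nat.choose_eq_zero_of_lt (by omega)]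
    simp

theorem binom_go_choose (p : Nat) (hp : p.Prime) :
    ∀ k n : Nat, ∀ r : Int,
      binom_mod_p_go (n : Int) (k : Int) (p : Int) r = (r * ((n.choose k : Nat) : Int)) % (p : Int) := by
  intro k
  induction k using Nat.strong_induction_on with
  | _ k ih =>
    intro n r
    rw [binom_mod_p_go]
    by_cases hk : k = 0
    · subst hk
      rw [dif_neg (by omega)]
      rw [PySem.Int.mod_eq_emod_of_pos (by exact_mod_cast hp.pos)]
      simp
    · have hp2 : (2 : Nat) ≤ p := hp.two_le
      rw [dif_pos (by exact_mod_cast Nat.pos_of_ne_zero hk), dif_pos (by exact_mod_cast hp2)]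
      rw [PySem.Int.floordiv_natCast, PySem.Int.floordiv_natCast, PySem.Int.mod_natCast, PySem.Int.mod_natCast]
      rw [comb_small_choose, PySem.Int.mod_eq_emod_of_pos (by exact_mod_cast hp.pos)]
      rw [ih (k / p) (Nat.div_lt_self (Nat.pos_of_ne_zero hk) hp2) (n / p)]
      haveI : Fact p.Prime := ⟨hp⟩
      have hval : ((n % p).choose (k % p) * ((n / p).choose (k / p)) : Nat) % p = n.choose k % p :=
        (Choose.choose_modEq_choose_mod_mul_choose_div_nat (p := p)).symm
      have lucasZ : ((((n % p).choose (k % p) * ((n / p).choose (k / p)) : Nat)) : Int) ≡ ((n.choose k : Nat) : Int) [ZMOD (p : Int)] := by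
        show _ % _ = _ % _
        rw [← Int.natCast_mod, ← Int.natCast_mod, hval]
      have e1 : ((r * (((n % p).choose (k % p) : Nat) : Int)) % (p : Int))
          ≡ r * (((n % p).choose (k % p) : Nat) : Int) [ZMOD (p : Int)] := Int.emod_emod_of_dvd _ dvd_rfl
      have e2 : ((r * (((n % p).choose (k % p) : Nat) : Int)) % (p : Int) * (((n / p).choose (k / p) : Nat) : Int)) % (p : Int)
          = ((r * (((n % p).choose (k % p) : Nat) : Int)) * (((n / p).choose (k / p) : Nat) : Int)) % (p : Int) :=
        e1.mul_right _
      have e3 : ((r * (((n % p).choose (k % p) : Nat) : Int)) * (((n / p).choose (k / p) : Nat) : Int)) % (p : Int)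
          = (r * ((((n % p).choose (k % p) * ((n / p).choose (k / p)) : Nat)) : Int)) % (p : Int) := by
        push_cast
        ring_nf
      have e4 : (r * ((((n % p).choose (k % p) * ((n / p).choose (k / p)) : Nat)) : Int)) % (p : Int)
          = (r * ((n.choose k : Nat) : Int)) % (p : Int) := lucasZ.mul_left r
      rw [e2, e3, e4]

theorem emod_self_modEq (a n : Int) : a % n ≡ a [ZMOD n] := Int.emod_emod_of_dvd _ dvd_rfl

theorem binom_mod10_choose (n k : Nat) :
    binom_mod10 (n : Int) (k : Int) = ((n.choose k : Nat) : Int) % 10 := by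
  unfold binom_mod10 binom_mod_p
  have g5 := binom_go_choose 5 (by norm_num) k n 1
  have g2 := binom_go_choose 2 (by norm_num) k n 1
  norm_num at g5 g2
  rw [g5, g2]
  rw [PySem.Int.mod_eq_emod_of_pos (by norm_num)]
  have h2 : ((n.choose k : Nat) : Int) % 5 * 6 + ((n.choose k : Nat) : Int) % 2 * 5
      ≡ ((n.choose k : Nat) : Int) [ZMOD 2] := by
    have a1 : ((n.choose k : Nat) : Int) % 5 * 6 ≡ ((n.choose k : Nat) : Int) % 5 * 0 [ZMOD 2] :=
      Int.ModEq.mul_left _ (by decide)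
    have a2 : ((n.choose k : Nat) : Int) % 2 * 5 ≡ ((n.choose k : Nat) : Int) * 1 [ZMOD 2] :=
      ((emod_self_modEq _ _).mul_right 5).trans (Int.ModEq.mul_left _ (by decide))
    simpa using a1.add a2
  have h5 : ((n.choose k : Nat) : Int) % 5 * 6 + ((n.choose k : Nat) : Int) % 2 * 5
      ≡ ((n.choose k : Nat) : Int) [ZMOD 5] := by
    have a1 : ((n.choose k : Nat) : Int) % 5 * 6 ≡ ((n.choose k : Nat) : Int) * 1 [ZMOD 5] :=
      ((emod_self_modEq _ _).mul_right 6).trans (Int.ModEq.mul_left _ (by decide))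
    have a2 : ((n.choose k : Nat) : Int) % 2 * 5 ≡ ((n.choose k : Nat) : Int) % 2 * 0 [ZMOD 5] :=
      Int.ModEq.mul_left _ (by decide)
    simpa using a1.add a2
  have h10 : ((n.choose k : Nat) : Int) % 5 * 6 + ((n.choose k : Nat) : Int) % 2 * 5
      ≡ ((n.choose k : Nat) : Int) [ZMOD 10] := by
    have := (Int.modEq_and_modEq_iff_modEq_mul (by norm_num)).mp ⟨h2, h5⟩
    norm_num at this
    exact this
  exact h10

theorem chars_join_nil (cs : List (List Char)) : PySem.Chars.join [] cs = cs.flatten := by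
  induction cs with
  | nil => rfl
  | cons h t ih => cases t with
    | nil => simp [PySem.Chars.join, List.intercalate]
    | cons h2 t2 => rw [PySem.Chars.join_cons_cons]; simp_all

theorem join_toList (inp : List Int) :
    (PySem.Str.join "" (inp.map (fun x => PySem.Int.toStr x))).toList
      = (inp.map (fun x => PySem.Int.toChars x)).flatten := by
  rw [PySem.Str.toList_join]
  show PySem.Chars.join "".toList _ = _
  have : "".toList = ([] : List Char) := rfl
  rw [this, chars_join_nil]
  congr 1
  simp [Function.comp, PySem.Int.toList_toStr]

theorem parse_A_eq (inp : List Int) :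
    PySem.Int.ofStr? (PySem.Str.slice (get_answer inp) none (some 7))
      = PySem.Int.ofChars? (((inp.map (fun x => PySem.Int.toChars x)).flatten).take 7) := by
  unfold get_answer
  rw [show PySem.Int.ofStr? = fun s => PySem.Int.ofChars? s.toList from rfl]
  simp only []
  rw [PySem.Str.toList_slice, PySem.Str.toList_slice]
  unfold PySem.Chars.slice
  rw [PySem.List.slice_to _ (by norm_num), PySem.List.slice_to _ (by norm_num)]
  rw [join_toList]
  have h7 : Int.toNat 7 = 7 := rfl
  have h8 : Int.toNat 8 = 8 := rfl
  rw [h7, h8, List.take_take]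
  norm_num

theorem parse_B_eq (inp : List Int) :
    PySem.Int.ofStr? (PySem.Str.slice (PySem.Str.join "" (inp.map (fun x => PySem.Int.toStr x))) none (some 7))
      = PySem.Int.ofChars? (((inp.map (fun x => PySem.Int.toChars x)).flatten).take 7) := by
  rw [show PySem.Int.ofStr? = fun s => PySem.Int.ofChars? s.toList from rfl]
  simp only []
  rw [PySem.Str.toList_slice]
  unfold PySem.Chars.slice
  rw [PySem.List.slice_to _ (by norm_num), join_toList]
  have h7 : Int.toNat 7 = 7 := rfl
  rw [h7]

theorem stepL_iter_nil (c : Nat) : stepL^[c] ([] : List Int) = [] := by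
  induction c with
  | zero => rfl
  | succ c ih => rw [Function.iterate_succ_apply, show stepL [] = [] from rfl, ih]

theorem sum_mod10_mul (M : Nat) (a b : Nat → Int) :
    (∑ k ∈ Finset.range M, (a k % 10) * b k) % 10 = (∑ k ∈ Finset.range M, a k * b k) % 10 := by
  rw [Finset.sum_int_mod, Finset.sum_int_mod (f := fun k => a k * b k)]
  congr 1
  refine Finset.sum_congr rfl (fun k _ => ?_)
  conv_rhs => rw [Int.mul_emod]
  rw [Int.mul_emod, Int.emod_emod_of_dvd _ dvd_rfl]

theorem map_pyRange_sum (M : Nat) (g : Int → Int) :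
    ((PySem.List.pyRange 0 (M : Int) 1).map g).sum = ∑ k ∈ Finset.range M, g (k : Int) := by
  induction M with
  | zero => rw [PySem.List.pyRange_one_eq_nil (by omega)]; simp
  | succ M ih =>
    have hc : ((M + 1 : Nat) : Int) = (M : Int) + 1 := by push_cast; ring
    rw [hc, PySem.List.pyRange_one_succ_right (by omega), List.map_append, List.sum_append, ih, Finset.sum_range_succ]
    simp

theorem slice_off8 (L : List Int) (off : Int) (hoff : 0 ≤ off) :
    PySem.List.slice L (some off) (some (off + 8)) = (L.drop off.toNat).take 8 := by
  rw [PySem.List.slice_toNat L hoff (by omega)]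
  congr 1
  omega

theorem B_core (t : List Int) (count : Int) (hc : 0 < count) :
    (PySem.List.pyRange 0 (min 8 ((t.length : Nat) : Int)) 1).foldl (fun out i =>
        out ++ [PySem.Int.mod
          ((PySem.List.pyRange 0 (((t.length : Nat) : Int) - i) 1).foldl
            (fun acc k => acc +
              PySem.List.pyGetD ((PySem.List.pyRange 0 ((t.length : Nat) : Int) 1).map
                  (fun k => binom_mod10 (count - 1 + k) k)) k 0
                * PySem.List.pyGetD t (i + k) 0) 0)
          10]) []
      = (stepL^[count.toNat] t).take 8 := by
  rw [PySem.List.foldl_append_singleton_eq_map, List.nil_append]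
  have hmin : min (8 : Int) ((t.length : Nat) : Int) = ((min 8 t.length : Nat) : Int) := by
    push_cast; omega
  rw [hmin]
  apply List.ext_getElem
  · rw [List.length_map, PySem.List.length_pyRange_one, List.length_take, stepL_length_iter]
    omega
  · intro ii h1 h2
    rw [List.getElem_map, PySem.List.getElem_pyRange_one, zero_add]
    rw [List.length_map, PySem.List.length_pyRange_one] at h1
    have hii : ii < min 8 t.length := by omega
    have hiit : ii < t.length := by omega
    -- right-hand side entry
    have hct : count.toNat = (count.toNat - 1) + 1 := by omega
    rw [List.getElem_take,
      ← List.getD_eq_getElem (stepL^[count.toNat] t) 0 (by rw [stepL_length_iter]; omega)]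
    rw [hct, stepL_iter_getD (count.toNat - 1) t ii hiit]
    -- left-hand side entry
    rw [PySem.Int.mod_eq_emod_of_pos (by norm_num)]
    have hsub : ((t.length : Nat) : Int) - ((ii : Nat) : Int) = ((t.length - ii : Nat) : Int) := by omega
    rw [hsub, PySem.List.foldl_add, zero_add, map_pyRange_sum]
    have hterm : ∀ k ∈ Finset.range (t.length - ii),
        PySem.List.pyGetD ((PySem.List.pyRange 0 ((t.length : Nat) : Int) 1).map
            (fun k => binom_mod10 (count - 1 + k) k)) (k : Int) 0
          * PySem.List.pyGetD t (((ii : Nat) : Int) + (k : Int)) 0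
        = ((((count.toNat - 1) + k).choose k : Nat) : Int) % 10 * t.getD (ii + k) 0 := by
      intro k hk
      simp only [Finset.mem_range] at hk
      rw [PySem.List.pyGetD_map_pyRange_of_nonneg _ _ _ _ (by omega) (by exact_mod_cast (by omega : k < t.length))]
      have hcast : count - 1 + (k : Int) = (((count.toNat - 1) + k : Nat) : Int) := by
        push_cast; omega
      rw [hcast, binom_mod10_choose]
      have hik : ((ii : Nat) : Int) + ((k : Nat) : Int) = ((ii + k : Nat) : Int) := by push_cast; ring
      rw [hik, PySem.List.pyGetD_natCast]
    rw [Finset.sum_congr rfl hterm]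
    exact sum_mod10_mul (t.length - ii) (fun k => ((((count.toNat - 1) + k).choose k : Nat) : Int)) (fun k => t.getD (ii + k) 0)

theorem main_equiv (inp : List Int) (count : Int) (hpre : Pre_repeat_fft_p2 inp count) :
    repeat_fft_p2 inp count = repeat_fft_p2_alt inp count := by
  unfold Pre_repeat_fft_p2 at hpre
  unfold repeat_fft_p2 repeat_fft_p2_alt
  rw [parse_A_eq, parse_B_eq]
  cases hparse : PySem.Int.ofChars? (((inp.map (fun x => PySem.Int.toChars x)).flatten).take 7) with
  | none => first
    | rfl
    | (exfalso; rw [hparse] at hpre; simp at hpre)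
  | some off =>
    rw [hparse] at hpre
    simp only [Option.getD_some] at hpre
    simp only []
    have hoffo : off = ((off.toNat : Nat) : Int) := (Int.toNat_of_nonneg hpre).symm
    rw [hoffo]
    by_cases hcount : count ≤ 0
    · rw [PySem.List.pyRange_one_eq_nil (by omega), List.foldl_nil, if_pos hcount]
      rw [List.toList_toArray, slice_off8 _ _ (by omega)]
      rw [PySem.List.slice_from _ (by omega), PySem.List.slice_to _ (by omega)]
      simp
    · have hc0 : 0 < count := by omega
      rw [if_neg hcount]
      rw [foldl_const_iterate, PySem.List.length_pyRange_one]
      have hcnt : ((count : Int) - 0).toNat = count.toNat := by omega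
      rw [hcnt]
      rw [PySem.List.slice_from _ (by omega), Int.toNat_natCast]
      by_cases hon : off.toNat ≤ (PySem.List.pyRepeat inp 10000).length
      · rw [iterA (PySem.List.pyRepeat inp 10000).length off.toNat hon count.toNat
            (PySem.List.pyRepeat inp 10000) rfl]
        rw [slice_off8 _ _ (by omega), Int.toNat_natCast]
        have hto : ((PySem.List.pyRepeat inp 10000).take off.toNat).length = off.toNat := by
          rw [List.length_take]; omega
        rw [List.drop_left' hto]
        exact (B_core ((PySem.List.pyRepeat inp 10000).drop off.toNat) count hc0).symm
      · have hdrop : (PySem.List.pyRepeat inp 10000).drop off.toNat = [] :=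
          List.drop_eq_nil_of_le (by omega)
        rw [PySem.List.pyRange_neg_one_eq_nil (by omega)]
        simp only [List.foldl_nil]
        rw [Function.iterate_fixed rfl count.toNat, List.toList_toArray, slice_off8 _ _ (by omega),
          Int.toNat_natCast, hdrop, B_core ([]) count hc0, stepL_iter_nil]

-- ===== VERDICT (by name: the statement is the Claim_ definition above) =====
theorem repeat_fft_p2_spec : Claim_equal_repeat_fft_p2 := by
  intro inp count _ hpre
  unfold Spec_repeat_fft_p2
  exact main_equiv inp count hpre
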